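-- pv_equiv track=rewrite | github.com/Eshan05/SemIII-Lab-SPPU | DSL/A/A1.py | neither
-- ===== SOURCE A (Python) =====
-- def cricket_badminton(cricket, badminton):
--     # Returns a list of students who play both cricket and badminton.
--     result = []
--     for student in cricket:
--         if student in badminton:
--             result.append(student)
--     return result
--
-- def neither(cricket, badminton, football):
--     # Returns the number of students who play neither cricket nor badminton.
--     all_students = set()
--     for student in cricket:
--         all_students.add(student)
--     for student in badminton:
--         all_students.add(student)
--     for student in football:
--         all_students.add(student)
--
--     cricket_badminton_students = set(cricket_badminton(cricket, badminton))
--     neither_cricket_nor_badminton = all_students - cricket_badminton_students - set(cricket) - set(badminton)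
--     return len(neither_cricket_nor_badminton)
-- ===== SOURCE B (Python) =====
-- def neither(cricket, badminton, football):
--     # Returns the number of students who play neither cricket nor badminton.
--     cset = set(cricket)
--     bset = set(badminton)
--     return len(set(football) - cset - bset)
-- ===== Notes on version B (the rewrite author's own statement) =====
-- stated objective: faster
-- what changed: B drops the helper that computes the cricket-badminton intersection via a quadratic list-membership scan and drops the three-list union entirely: subtracting set(cricket) and set(badminton) already removes both, so B builds only the three sets and takes two set differences in one expression.
import Mathlib
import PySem

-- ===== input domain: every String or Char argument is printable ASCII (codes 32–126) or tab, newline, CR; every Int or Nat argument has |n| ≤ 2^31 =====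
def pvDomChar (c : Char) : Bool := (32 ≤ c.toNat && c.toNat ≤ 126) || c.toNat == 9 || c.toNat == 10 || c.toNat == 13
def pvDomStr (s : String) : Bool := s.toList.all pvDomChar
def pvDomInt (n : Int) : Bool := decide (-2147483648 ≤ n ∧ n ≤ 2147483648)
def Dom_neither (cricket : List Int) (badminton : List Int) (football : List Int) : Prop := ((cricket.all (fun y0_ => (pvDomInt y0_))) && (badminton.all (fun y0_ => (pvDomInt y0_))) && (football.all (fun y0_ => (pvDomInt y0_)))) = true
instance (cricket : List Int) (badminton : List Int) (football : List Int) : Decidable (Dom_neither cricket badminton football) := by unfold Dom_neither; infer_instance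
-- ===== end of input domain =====

-- B drops A's helper intersection pass and the three-list union: subtracting set(cricket)
-- and set(badminton) already removes both, so B is just len(set(football) - cset - bset).


-- ===== PORT A =====
def cricket_badminton (cricket : List Int) (badminton : List Int) : List Int :=
  cricket.foldl (fun result student =>
    if badminton.contains student then result ++ [student] else result) []

def neither (cricket : List Int) (badminton : List Int) (football : List Int) : Int :=
  let all_students : PySem.Set Int := PySem.Set.empty
  let all_students := cricket.foldl PySem.Set.add all_students
  let all_students := badminton.foldl PySem.Set.add all_students
  let all_students := football.foldl PySem.Set.add all_students
  let cb_students : PySem.Set Int := PySem.Set.ofList (cricket_badminton cricket badminton)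
  let result := PySem.Set.diff (PySem.Set.diff (PySem.Set.diff all_students cb_students)
      (PySem.Set.ofList cricket)) (PySem.Set.ofList badminton)
  PySem.Set.len result

-- ===== PORT B =====
def neither_alt (cricket : List Int) (badminton : List Int) (football : List Int) : Int :=
  let cset : PySem.Set Int := PySem.Set.ofList cricket
  let bset : PySem.Set Int := PySem.Set.ofList badminton
  PySem.Set.len (PySem.Set.diff (PySem.Set.diff (PySem.Set.ofList football) cset) bset)

-- ===== PRECONDITION & SPEC =====
def Spec_neither (cricket : List Int) (badminton : List Int) (football : List Int) (out : Int) : Prop := out = neither_alt cricket badminton football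
instance (cricket : List Int) (badminton : List Int) (football : List Int) (out : Int) : Decidable (Spec_neither cricket badminton football out) := by unfold Spec_neither; infer_instance

-- ===== CLAIM (what is proved, stated in full; the proofs are below) =====
def Claim_equal_neither : Prop := ∀ (cricket : List Int) (badminton : List Int) (football : List Int), Dom_neither cricket badminton football → Spec_neither cricket badminton football (neither cricket badminton football)

-- ===== LEMMAS AND PROOFS =====


theorem cb_mem (cricket badminton : List Int) (acc : List Int) (x : Int)
    (h : x ∈ cricket.foldl (fun result student =>
        if badminton.contains student then result ++ [student] else result) acc) :
    x ∈ acc ∨ x ∈ cricket := by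
  induction cricket generalizing acc with
  | nil => exact Or.inl h
  | cons y ys ih =>
    simp only [List.foldl_cons] at h
    rcases ih _ h with h' | h'
    · split at h'
      · rcases List.mem_append.mp h' with h'' | h''
        · exact Or.inl h''
        · exact Or.inr (by simp at h''; simp [h''])
      · exact Or.inl h'
    · exact Or.inr (List.mem_cons_of_mem _ h')

-- A's result set and B's result set are both Nodup and have the same members
-- (x ∈ football ∧ x ∉ cricket ∧ x ∉ badminton), hence are permutations: equal length.
theorem neither_sets_perm (cricket badminton football : List Int) :
    (PySem.Set.diff (PySem.Set.diff (PySem.Set.diff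
        (football.foldl PySem.Set.add (badminton.foldl PySem.Set.add
          (cricket.foldl PySem.Set.add (PySem.Set.empty : PySem.Set Int))))
        (PySem.Set.ofList (cricket_badminton cricket badminton)))
        (PySem.Set.ofList cricket)) (PySem.Set.ofList badminton)).Perm
    (PySem.Set.diff (PySem.Set.diff (PySem.Set.ofList football)
        (PySem.Set.ofList cricket)) (PySem.Set.ofList badminton)) := by
  have hall : football.foldl PySem.Set.add (badminton.foldl PySem.Set.add
      (cricket.foldl PySem.Set.add (PySem.Set.empty : PySem.Set Int)))
      = PySem.Set.update (PySem.Set.update (PySem.Set.update PySem.Set.empty cricket) badminton) football := rfl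
  rw [hall]
  have hnA : (PySem.Set.update (PySem.Set.update (PySem.Set.update (PySem.Set.empty : PySem.Set Int) cricket) badminton) football).Nodup :=
    PySem.Set.nodup_update _ _ (PySem.Set.nodup_update _ _ (PySem.Set.nodup_update _ _ List.nodup_nil))
  rw [List.perm_ext_iff_of_nodup
    (PySem.Set.nodup_diff _ _ (PySem.Set.nodup_diff _ _ (PySem.Set.nodup_diff _ _ hnA)))
    (PySem.Set.nodup_diff _ _ (PySem.Set.nodup_diff _ _ (PySem.Set.nodup_ofList _)))]
  intro x
  simp only [PySem.Set.mem_diff, PySem.Set.mem_update, PySem.Set.mem_ofList]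
  constructor
  · rintro ⟨⟨⟨h, _⟩, hc⟩, hb⟩
    refine ⟨⟨?_, hc⟩, hb⟩
    rcases h with ((h | h) | h) | h
    · simp [PySem.Set.empty] at h
    · exact absurd h hc
    · exact absurd h hb
    · exact h
  · rintro ⟨⟨hf, hc⟩, hb⟩
    refine ⟨⟨⟨Or.inr hf, ?_⟩, hc⟩, hb⟩
    intro hcb
    exact hc ((cb_mem cricket badminton [] x (by simpa [cricket_badminton, PySem.Set.mem_ofList] using hcb)).resolve_left (by simp))

-- ===== VERDICT (by name: the statement is the Claim_ definition above) =====
theorem neither_spec : Claim_equal_neither := by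
  intro cricket badminton football _
  show neither cricket badminton football = neither_alt cricket badminton football
  unfold neither neither_alt
  simp only [PySem.Set.len]
  rw [(neither_sets_perm cricket badminton football).length_eq]
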